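-- pv_equiv track=rewrite | github.com/mazumder-lab/SNOWS | CNN_pruning/prune/helpers.py | generate_M_sized_groups
-- ===== SOURCE A (Python) =====
-- def generate_M_sized_groups(d_in, k_h, k_w, M):
--     overall_groups = set()
--     groups = []
--
--     num_vars = int(d_in * k_h * k_w)
--
--     for i in range(num_vars):
--         if i not in overall_groups:
--             group_i = [i + k_h * k_w * j for j in range(M) if i + k_h * k_w * j < num_vars]
--             if len(group_i) == M:
--                 groups.append(group_i)
--                 overall_groups.update(group_i)
--
--     if not groups:
--         raise ValueError(f"Unable to generate any valid groups of size {M} with the given parameters.")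
--
--     return groups
-- ===== SOURCE B (Python) =====
-- def generate_M_sized_groups(d_in, k_h, k_w, M):
--     # Closed-form tiling: the greedy visited-set loop always selects the S starts
--     # of each of num_vars // (M*S) contiguous blocks of M*S indices.
--     S = k_h * k_w
--     num_vars = int(d_in * k_h * k_w)
--     num_blocks = num_vars // (M * S)
--     groups = [[b * M * S + r + S * j for j in range(M)]
--               for b in range(num_blocks) for r in range(S)]
--     if not groups:
--         raise ValueError(f"Unable to generate any valid groups of size {M} with the given parameters.")
--     return groups
-- ===== Notes on version B (the rewrite author's own statement) =====
-- stated objective: faster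
-- what changed: Replaces the greedy loop over all indices with a visited set and per-index membership tests by a direct closed-form tiling: num_vars//(M*S) blocks of M*S indices, each emitting S arithmetic-progression groups, with no set and no membership test.
-- outside the precondition, e.g. on generate_M_sized_groups(2, 1, 1, 0): A returns [[], []], B raises ZeroDivisionError; on generate_M_sized_groups(-2, -1, 1, 2): A returns [[0, -1], [1, 0]], B raises ValueError
import Mathlib
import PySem

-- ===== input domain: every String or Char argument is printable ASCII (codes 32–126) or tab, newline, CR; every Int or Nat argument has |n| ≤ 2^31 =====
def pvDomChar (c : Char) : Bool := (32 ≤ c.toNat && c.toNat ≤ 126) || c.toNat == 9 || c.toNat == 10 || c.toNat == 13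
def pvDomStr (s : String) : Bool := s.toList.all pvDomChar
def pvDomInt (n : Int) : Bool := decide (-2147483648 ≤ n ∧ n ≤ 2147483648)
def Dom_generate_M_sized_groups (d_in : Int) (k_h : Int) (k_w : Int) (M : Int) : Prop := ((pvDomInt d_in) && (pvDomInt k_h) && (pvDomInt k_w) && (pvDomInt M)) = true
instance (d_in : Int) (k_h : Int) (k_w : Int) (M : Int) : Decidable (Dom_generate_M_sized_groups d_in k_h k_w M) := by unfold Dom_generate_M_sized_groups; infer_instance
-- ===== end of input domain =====

-- B replaces A's greedy visited-set scan by the closed-form block tiling it produces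
-- (objective: faster, no set and no per-index membership test); return value only —
-- on inputs excluded by Pre_ below B raises where A returns (see the Pre_ comment).

-- ===== PORT A =====
def generate_M_sized_groups (d_in : Int) (k_h : Int) (k_w : Int) (M : Int) : List (List Int) :=
  let num_vars : Int := d_in * k_h * k_w
  let st :=
    (PySem.List.pyRange 0 num_vars 1).foldl
      (fun (st : PySem.Set Int × List (List Int)) i =>
        if i ∉ st.1 then
          let group_i : List Int :=
            ((PySem.List.pyRange 0 M 1).filter
              (fun j => decide (i + k_h * k_w * j < num_vars))).map
              (fun j => i + k_h * k_w * j)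
          if (group_i.length : Int) = M then
            (PySem.Set.update st.1 group_i, st.2 ++ [group_i])
          else st
        else st)
      (PySem.Set.empty, [])
  st.2
  -- the trailing 'raise ValueError' of A fires exactly when this list is empty; Pre_ excludes it

-- ===== PORT B =====
def generate_M_sized_groups_alt (d_in : Int) (k_h : Int) (k_w : Int) (M : Int) : List (List Int) :=
  let S : Int := k_h * k_w
  let num_vars : Int := d_in * k_h * k_w
  let num_blocks : Int := PySem.Int.floordiv num_vars (M * S)
  (PySem.List.pyRange 0 num_blocks 1).flatMap (fun b =>
    (PySem.List.pyRange 0 S 1).map (fun r =>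
      (PySem.List.pyRange 0 M 1).map (fun j => b * M * S + r + S * j)))
  -- B's 'raise ValueError' also fires exactly when this list is empty; Pre_ excludes it

-- ===== PRECONDITION & SPEC =====
-- Pre_ is the natural domain: positive conv dimensions and a feasible group size 1 ≤ M ≤ d_in.
-- It excludes: inputs where A raises ValueError (no group of size M exists, i.e. M < 1 or d_in < M,
-- or num_vars ≤ 0); the degenerate M = 0 with num_vars > 0, where A returns num_vars empty groups
-- (a quirk — B raises ZeroDivisionError there); and negative dimensions with num_vars > 0, where
-- A returns overlapping groups with negative indices (outside the function's purpose — B raises).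
def Pre_generate_M_sized_groups (d_in : Int) (k_h : Int) (k_w : Int) (M : Int) : Prop :=
  1 ≤ d_in ∧ 1 ≤ k_h ∧ 1 ≤ k_w ∧ 1 ≤ M ∧ M ≤ d_in
instance (d_in : Int) (k_h : Int) (k_w : Int) (M : Int) : Decidable (Pre_generate_M_sized_groups d_in k_h k_w M) := by unfold Pre_generate_M_sized_groups; infer_instance

def pvWitness_generate_M_sized_groups : Int × Int × Int × Int := (3, 2, 1, 2)

def Spec_generate_M_sized_groups (d_in : Int) (k_h : Int) (k_w : Int) (M : Int) (out : List (List Int)) : Prop := out = generate_M_sized_groups_alt d_in k_h k_w M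
instance (d_in : Int) (k_h : Int) (k_w : Int) (M : Int) (out : List (List Int)) : Decidable (Spec_generate_M_sized_groups d_in k_h k_w M out) := by unfold Spec_generate_M_sized_groups; infer_instance

-- ===== CLAIM (what is proved, stated in full; the proofs are below) =====
def Claim_equal_generate_M_sized_groups : Prop := ∀ (d_in : Int) (k_h : Int) (k_w : Int) (M : Int), Dom_generate_M_sized_groups d_in k_h k_w M → Pre_generate_M_sized_groups d_in k_h k_w M → Spec_generate_M_sized_groups d_in k_h k_w M (generate_M_sized_groups d_in k_h k_w M)

-- ===== LEMMAS AND PROOFS =====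

-- A's loop body, with S = k_h*k_w and n = num_vars abstracted.
def gstep (S n M : Int) (st : PySem.Set Int × List (List Int)) (i : Int) :
    PySem.Set Int × List (List Int) :=
  if i ∉ st.1 then
    let group_i : List Int :=
      ((PySem.List.pyRange 0 M 1).filter (fun j => decide (i + S * j < n))).map
        (fun j => i + S * j)
    if (group_i.length : Int) = M then
      (PySem.Set.update st.1 group_i, st.2 ++ [group_i])
    else st
  else st

lemma genA_eq_fold (d_in k_h k_w M : Int) :
    generate_M_sized_groups d_in k_h k_w M =
      ((PySem.List.pyRange 0 (d_in * k_h * k_w) 1).foldl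
        (gstep (k_h * k_w) (d_in * k_h * k_w) M) (PySem.Set.empty, [])).2 := by
  unfold generate_M_sized_groups gstep
  simp only [mul_assoc]

-- the candidate group at start index i
def ggroup (S n M i : Int) : List Int :=
  ((PySem.List.pyRange 0 M 1).filter (fun j => decide (i + S * j < n))).map
    (fun j => i + S * j)

lemma ggroup_full {S n M : Int} (hS : 0 < S) (hM : 0 < M) {i : Int}
    (h : i + S * (M - 1) < n) :
    ggroup S n M i = (PySem.List.pyRange 0 M 1).map (fun j => i + S * j) ∧
      ((ggroup S n M i).length : Int) = M := by
  have hfil : (PySem.List.pyRange 0 M 1).filter (fun j => decide (i + S * j < n)) =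
      PySem.List.pyRange 0 M 1 := by
    rw [List.filter_eq_self]
    intro j hj
    rw [PySem.List.mem_pyRange_one] at hj
    have : S * j ≤ S * (M - 1) := by
      apply mul_le_mul_of_nonneg_left (by omega) hS.le
    simp only [decide_eq_true_eq]
    omega
  constructor
  · rw [ggroup, hfil]
  · rw [ggroup, hfil, List.length_map, PySem.List.length_pyRange_one]
    omega

lemma ggroup_short {S n M : Int} (hS : 0 < S) (hM : 0 < M) {i : Int}
    (h : n ≤ i + S * (M - 1)) :
    ((ggroup S n M i).length : Int) ≠ M := by
  have hmem : (M - 1) ∈ PySem.List.pyRange 0 M 1 := by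
    rw [PySem.List.mem_pyRange_one]; omega
  have hlt : ((PySem.List.pyRange 0 M 1).filter
      (fun j => decide (i + S * j < n))).length < (PySem.List.pyRange 0 M 1).length := by
    rw [List.length_filter_lt_length_iff_exists]
    exact ⟨M - 1, hmem, by simp only [decide_eq_true_eq]; omega⟩
  rw [ggroup, List.length_map]
  rw [PySem.List.length_pyRange_one] at hlt
  omega

lemma foldl_fixed {α β : Type} (f : β → α → β) (l : List α) (st : β)
    (h : ∀ i ∈ l, f st i = st) : l.foldl f st = st := by
  induction l with
  | nil => rfl
  | cons hd tl ih =>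
    rw [List.foldl_cons, h hd (by simp)]
    exact ih (fun i hi => h i (by simp [hi]))

-- membership in the group started at base + r
lemma mem_block_group {S M base r x : Int} (hS : 0 < S) (hM : 0 < M)
    (hr0 : 0 ≤ r) (hrS : r < S) :
    (x ∈ (PySem.List.pyRange 0 M 1).map (fun j => base + r + S * j)) ↔
      (base ≤ x ∧ x < base + M * S ∧ (x - base) % S = r) := by
  rw [List.mem_map]
  constructor
  · rintro ⟨j, hj, rfl⟩
    rw [PySem.List.mem_pyRange_one] at hj
    have hmod : (base + r + S * j - base) % S = r := by
      have : base + r + S * j - base = r + S * j := by ring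
      rw [this, Int.add_mul_emod_self_left, Int.emod_eq_of_lt hr0 hrS]
    have h1 : 0 ≤ S * j := mul_nonneg hS.le (by omega)
    have h2 : S * j ≤ S * (M - 1) := mul_le_mul_of_nonneg_left (by omega) hS.le
    refine ⟨by omega, by nlinarith, hmod⟩
  · rintro ⟨h1, h2, h3⟩
    refine ⟨(x - base) / S, ?_, ?_⟩
    · rw [PySem.List.mem_pyRange_one]
      constructor
      · exact Int.ediv_nonneg (by omega) hS.le
      · rw [Int.ediv_lt_iff_lt_mul hS]; omega
    · have := Int.ediv_add_emod (x - base) S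
      omega

-- the inner loop over the S start indices of one block
lemma starts_phase {S n M base : Int} (hS : 0 < S) (hM : 0 < M)
    (hbase : 0 ≤ base) (hfit : base + S * M ≤ n) :
    ∀ (k : Nat) (r : Int), 0 ≤ r → r + k = S →
    ∀ (v : PySem.Set Int) (gs : List (List Int)),
    (∀ x : Int, x ∈ v ↔ ((0 ≤ x ∧ x < base) ∨
        (base ≤ x ∧ x < base + M * S ∧ (x - base) % S < r))) →
    ∃ v₂ : PySem.Set Int,
      (PySem.List.pyRange (base + r) (base + S) 1).foldl (gstep S n M) (v, gs) =
        (v₂, gs ++ (PySem.List.pyRange (base + r) (base + S) 1).map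
          (fun i => (PySem.List.pyRange 0 M 1).map (fun j => i + S * j))) ∧
      (∀ x : Int, x ∈ v₂ ↔ (0 ≤ x ∧ x < base + M * S)) := by
  intro k
  induction k with
  | zero =>
    intro r hr0 hrk v gs hv
    refine ⟨v, ?_, ?_⟩
    · rw [PySem.List.pyRange_one_eq_nil (by omega)]
      simp
    · intro x
      rw [hv x]
      have hrS : r = S := by omega
      constructor
      · rintro (⟨h1, h2⟩ | ⟨h1, h2, h3⟩)
        · have : 0 < M * S := mul_pos hM hS
          omega
        · omega
      · intro ⟨h1, h2⟩
        by_cases hxb : x < base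
        · left; omega
        · right
          refine ⟨by omega, h2, ?_⟩
          rw [hrS]
          exact Int.emod_lt_of_pos _ hS
  | succ k ih =>
    intro r hr0 hrk v gs hv
    have hrS : r < S := by omega
    have hcons : PySem.List.pyRange (base + r) (base + S) 1 =
        (base + r) :: PySem.List.pyRange (base + r + 1) (base + S) 1 :=
      PySem.List.pyRange_one_cons (by omega)
    -- the start index is fresh
    have hnotmem : (base + r) ∉ v := by
      rw [hv]
      push_neg
      constructor
      · intro _; omega
      · intro _ _
        have : (base + r - base) % S = r := by
          have h1 : base + r - base = r := by ring
          rw [h1, Int.emod_eq_of_lt hr0 hrS]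
        omega
    -- its group is full
    have hfull := ggroup_full (n := n) hS hM (i := base + r)
      (by nlinarith [hfit, hrS, mul_pos hS hM])
    set g : List Int := (PySem.List.pyRange 0 M 1).map (fun j => base + r + S * j) with hg
    have hstep : gstep S n M (v, gs) (base + r) = (PySem.Set.update v g, gs ++ [g]) := by
      rw [gstep]
      simp only [hnotmem, not_false_eq_true, if_true]
      have h1 : ggroup S n M (base + r) = g := hfull.1
      have h2 := hfull.2
      rw [ggroup] at h1 h2
      rw [h1] at h2 ⊢
      rw [if_pos h2]
    -- updated membership
    have hv' : ∀ x : Int, x ∈ PySem.Set.update v g ↔ ((0 ≤ x ∧ x < base) ∨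
        (base ≤ x ∧ x < base + M * S ∧ (x - base) % S < r + 1)) := by
      intro x
      rw [PySem.Set.mem_update, hv x, hg, mem_block_group hS hM hr0 hrS]
      have hnn : 0 ≤ (x - base) % S := Int.emod_nonneg _ (by omega)
      constructor
      · rintro ((h | h) | h)
        · left; exact h
        · right; exact ⟨h.1, h.2.1, by omega⟩
        · right; exact ⟨h.1, h.2.1, by omega⟩
      · rintro (h | ⟨h1, h2, h3⟩)
        · left; left; exact h
        · rcases lt_or_ge ((x - base) % S) r with hlt | hge
          · left; right; exact ⟨h1, h2, hlt⟩
          · right; exact ⟨h1, h2, by omega⟩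
    obtain ⟨v₂, hfold, hv₂⟩ := ih (r + 1) (by omega) (by omega)
      (PySem.Set.update v g) (gs ++ [g]) hv'
    refine ⟨v₂, ?_, hv₂⟩
    rw [hcons, List.foldl_cons, hstep]
    have harr : base + (r + 1) = base + r + 1 := by ring
    rw [harr] at hfold
    rw [hfold]
    simp [hg]

-- the whole loop, block by block
lemma blocks_phase {S n M nb : Int} (hS : 0 < S) (hM : 0 < M)
    (hub : nb * M * S ≤ n) (htail : n ≤ nb * M * S + M * S - S) :
    ∀ (k : Nat) (b : Int), 0 ≤ b → b + k = nb →
    ∀ (v : PySem.Set Int) (gs : List (List Int)),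
    (∀ x : Int, x ∈ v ↔ (0 ≤ x ∧ x < b * M * S)) →
    ((PySem.List.pyRange (b * M * S) n 1).foldl (gstep S n M) (v, gs)).2 =
      gs ++ (PySem.List.pyRange b nb 1).flatMap (fun b' =>
        (PySem.List.pyRange 0 S 1).map (fun r =>
          (PySem.List.pyRange 0 M 1).map (fun j => b' * M * S + r + S * j))) := by
  intro k
  induction k with
  | zero =>
    intro b hb0 hbk v gs hv
    have hbnb : b = nb := by omega
    subst hbnb
    rw [PySem.List.pyRange_one_eq_nil (le_refl _), List.flatMap_nil, List.append_nil]
    rw [foldl_fixed]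
    intro i hi
    rw [PySem.List.mem_pyRange_one] at hi
    have hni : i ∉ v := by rw [hv]; push_neg; intro _; omega
    rw [gstep]
    simp only [hni, not_false_eq_true, if_true]
    have hshort : ((ggroup S n M i).length : Int) ≠ M :=
      ggroup_short hS hM (by nlinarith)
    rw [ggroup] at hshort
    rw [if_neg hshort]
  | succ k ih =>
    intro b hb0 hbk v gs hv
    have hblt : b + 1 ≤ nb := by omega
    have hMS : 0 < M * S := mul_pos hM hS
    have hbound : b * M * S + M * S ≤ n := by
      nlinarith [mul_le_mul_of_nonneg_right hblt hMS.le]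
    have hbase0 : 0 ≤ b * M * S := by positivity
    -- split the range into: S starts, (M-1)*S skipped indices, the rest
    have hsplit : PySem.List.pyRange (b * M * S) n 1 =
        PySem.List.pyRange (b * M * S) (b * M * S + S) 1 ++
        (PySem.List.pyRange (b * M * S + S) (b * M * S + M * S) 1 ++
         PySem.List.pyRange (b * M * S + M * S) n 1) := by
      rw [← PySem.List.pyRange_one_append _ _ _ (by omega) (by nlinarith)]
      exact PySem.List.pyRange_one_append _ _ _ (by omega) (by omega)
    -- phase 1: the S starts
    have hv0 : ∀ x : Int, x ∈ v ↔ ((0 ≤ x ∧ x < b * M * S) ∨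
        (b * M * S ≤ x ∧ x < b * M * S + M * S ∧ (x - b * M * S) % S < 0)) := by
      intro x
      rw [hv x]
      have := Int.emod_nonneg (x - b * M * S) (show S ≠ 0 by omega)
      constructor
      · intro h; left; exact h
      · rintro (h | h); exact h; omega
    obtain ⟨v₂, hfold1, hv₂⟩ := starts_phase (n := n) hS hM hbase0
      (by nlinarith [hbound]) S.toNat 0 (le_refl 0) (by omega) v gs hv0
    rw [add_zero] at hfold1
    -- phase 2: the already-visited indices of the block
    have hfold2 : (PySem.List.pyRange (b * M * S + S) (b * M * S + M * S) 1).foldl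
        (gstep S n M) (v₂, gs ++ (PySem.List.pyRange (b * M * S) (b * M * S + S) 1).map
          (fun i => (PySem.List.pyRange 0 M 1).map (fun j => i + S * j))) =
        (v₂, gs ++ (PySem.List.pyRange (b * M * S) (b * M * S + S) 1).map
          (fun i => (PySem.List.pyRange 0 M 1).map (fun j => i + S * j))) := by
      apply foldl_fixed
      intro i hi
      rw [PySem.List.mem_pyRange_one] at hi
      have hmem : i ∈ v₂ := by rw [hv₂]; omega
      rw [gstep]
      simp [hmem]
    -- phase 3: the remaining blocks, by the IH
    have hv₂' : ∀ x : Int, x ∈ v₂ ↔ (0 ≤ x ∧ x < (b + 1) * M * S) := by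
      intro x
      rw [hv₂ x]
      have : (b + 1) * M * S = b * M * S + M * S := by ring
      omega
    have harr : (b + 1) * M * S = b * M * S + M * S := by ring
    have hrest := ih (b + 1) (by omega) (by omega) v₂
      (gs ++ (PySem.List.pyRange (b * M * S) (b * M * S + S) 1).map
        (fun i => (PySem.List.pyRange 0 M 1).map (fun j => i + S * j))) hv₂'
    rw [harr] at hrest
    rw [hsplit, List.foldl_append, hfold1, List.foldl_append, hfold2, hrest]
    -- reassemble the flatMap
    rw [PySem.List.pyRange_one_cons (show b < nb by omega), List.flatMap_cons,
      List.append_assoc]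
    congr 1
    congr 1
    -- block b's groups: reindex pyRange base (base+S) as pyRange 0 S
    simp only [PySem.List.pyRange_one, sub_zero, List.map_map]
    have hlen : (b * M * S + S - b * M * S).toNat = S.toNat := by omega
    rw [hlen]
    apply List.map_congr_left
    intro a _
    simp only [Function.comp_apply]
    apply List.map_congr_left
    intro j _
    simp only [Function.comp_apply]
    push_cast
    ring

-- ===== VERDICT (by name: the statement is the Claim_ definition above) =====
theorem generate_M_sized_groups_spec : Claim_equal_generate_M_sized_groups := by
  intro d_in k_h k_w M _ hpre
  obtain ⟨hd, hkh, hkw, hM1, hMd⟩ := hpre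
  unfold Spec_generate_M_sized_groups
  set S : Int := k_h * k_w with hSdef
  have hS : 0 < S := by positivity
  have hM : 0 < M := by omega
  have hMS : 0 < M * S := mul_pos hM hS
  set n : Int := d_in * k_h * k_w with hndef
  have hnS : n = d_in * S := by rw [hndef, hSdef]; ring
  -- the number of blocks
  set nb : Int := PySem.Int.floordiv n (M * S) with hnbdef
  have hqr := Int.ediv_add_emod d_in M
  have hr0 : 0 ≤ d_in % M := Int.emod_nonneg _ (by omega)
  have hrM : d_in % M < M := Int.emod_lt_of_pos _ hM
  have hnb : nb = d_in / M := by
    rw [hnbdef, PySem.Int.floordiv_eq_iff_of_pos hMS]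
    constructor
    · rw [hnS]; nlinarith
    · rw [hnS]; nlinarith
  have hnb0 : 0 ≤ nb := by rw [hnb]; exact Int.ediv_nonneg (by omega) (by omega)
  have hub : nb * M * S ≤ n := by rw [hnb, hnS]; nlinarith
  have htail : n ≤ nb * M * S + M * S - S := by rw [hnb, hnS]; nlinarith
  have hmain := blocks_phase hS hM hub htail nb.toNat 0 (le_refl 0)
    (by omega) PySem.Set.empty [] (by intro x; simp [PySem.Set.empty])
  rw [zero_mul, zero_mul] at hmain
  rw [genA_eq_fold]
  unfold generate_M_sized_groups_alt
  simp only [← hSdef, ← hndef, ← hnbdef]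
  rw [hmain, List.nil_append]
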